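-- pv_equiv track=rewrite | github.com/saztonov/aizoomdoc-client-py | src/aizoomdoc_client/markdown_formatter.py | _format_blockquotes
-- ===== SOURCE A (Python) =====
-- def _format_blockquotes(text: str) -> str:
--     """Convert > blockquotes to styled HTML."""
--     lines = text.split('\n')
--     result = []
--     in_quote = False
--     quote_lines = []
--
--     for line in lines:
--         stripped = line.strip()
--         if stripped.startswith('> ') or stripped == '>':
--             content = stripped[2:] if stripped.startswith('> ') else ''
--             quote_lines.append(content)
--             in_quote = True
--         else:
--             if in_quote:
--                 quote_content = '<br>'.join(quote_lines)
--                 result.append(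
--                     f'<div style="border-left:3px solid #ccc; padding-left:12px; '
--                     f'color:#555; margin:6px 0; font-style:italic;">'
--                     f'{quote_content}</div>'
--                 )
--                 quote_lines = []
--                 in_quote = False
--             result.append(line)
--
--     if in_quote:
--         quote_content = '<br>'.join(quote_lines)
--         result.append(
--             f'<div style="border-left:3px solid #ccc; padding-left:12px; '
--             f'color:#555; margin:6px 0; font-style:italic;">'
--             f'{quote_content}</div>'
--         )
--
--     return '\n'.join(result)
-- ===== SOURCE B (Python) =====
-- def _format_blockquotes(text: str) -> str:
--     """Convert > blockquotes to styled HTML (run-grouping re-implementation)."""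
--     def is_quote(line):
--         s = line.strip()
--         return s.startswith('> ') or s == '>'
--
--     def content(line):
--         s = line.strip()
--         return s[2:] if s.startswith('> ') else ''
--
--     lines = text.split('\n')
--     out = []
--     i = 0
--     n = len(lines)
--     while i < n:
--         if is_quote(lines[i]):
--             j = i
--             while j < n and is_quote(lines[j]):
--                 j += 1
--             body = '<br>'.join(content(l) for l in lines[i:j])
--             out.append(
--                 '<div style="border-left:3px solid #ccc; padding-left:12px; '
--                 'color:#555; margin:6px 0; font-style:italic;">'
--                 + body + '</div>'
--             )
--             i = j
--         else:
--             out.append(lines[i])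
--             i += 1
--     return '\n'.join(out)
-- ===== Notes on version B (the rewrite author's own statement) =====
-- stated objective: alternative
-- what changed: Replaces the in_quote flag / accumulator state machine with a two-pointer run-grouping scan: each maximal run of quote lines is located up front and emitted as one div, dropping the flag and the duplicated end-of-loop flush.
import Mathlib
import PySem

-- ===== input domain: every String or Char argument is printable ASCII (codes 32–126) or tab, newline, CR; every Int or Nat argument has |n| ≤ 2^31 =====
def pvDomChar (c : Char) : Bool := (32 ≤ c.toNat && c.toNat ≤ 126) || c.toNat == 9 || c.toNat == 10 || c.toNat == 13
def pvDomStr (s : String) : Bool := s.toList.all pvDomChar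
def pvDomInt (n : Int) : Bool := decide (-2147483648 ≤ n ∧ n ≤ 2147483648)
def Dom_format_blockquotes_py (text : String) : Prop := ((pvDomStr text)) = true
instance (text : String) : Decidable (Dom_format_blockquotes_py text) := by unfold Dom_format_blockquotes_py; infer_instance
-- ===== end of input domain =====

-- B re-implements A's flag/accumulator state machine as a run-grouping scan (alternative decomposition, same cost);
-- return values agree on all inputs (A is total), proved below.

-- the styled <div> wrapper both Pythons build with an f-string around '<br>'.join(...)
def pvDiv (qs : List String) : String :=
  "<div style=\"border-left:3px solid #ccc; padding-left:12px; color:#555; margin:6px 0; font-style:italic;\">"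
    ++ PySem.Str.join "<br>" qs ++ "</div>"

-- ===== PORT A =====
-- the for-loop of A, with its three pieces of state (result, in_quote, quote_lines), plus the final flush
def pvALoop : List String → List String → Bool → List String → List String
  | [], result, in_quote, quote_lines =>
      if in_quote then result ++ [pvDiv quote_lines] else result
  | line :: rest, result, in_quote, quote_lines =>
      let stripped := PySem.Str.strip line
      if PySem.Str.startswith stripped "> " || (stripped == ">") then
        let content := if PySem.Str.startswith stripped "> " then PySem.Str.slice stripped (some 2) none else ""
        pvALoop rest result true (quote_lines ++ [content])
      else
        if in_quote then
          pvALoop rest (result ++ [pvDiv quote_lines] ++ [line]) false []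
        else
          pvALoop rest (result ++ [line]) in_quote quote_lines

-- text.split('\n'): split? is `some` whenever the separator is nonempty, so `.getD []` never fires
def format_blockquotes_py (text : String) : String :=
  PySem.Str.join "\n" (pvALoop (((PySem.Str.split? text "\n").getD [])) [] false [])

-- ===== PORT B =====
def pvIsQuote (line : String) : Bool :=
  let s := PySem.Str.strip line
  PySem.Str.startswith s "> " || (s == ">")

def pvContent (line : String) : String :=
  let s := PySem.Str.strip line
  if PySem.Str.startswith s "> " then PySem.Str.slice s (some 2) none else ""

-- B's outer while-loop: at a quote line, consume the whole maximal run at once (the inner j-scan =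
-- takeWhile, lines[i:j] mapped to contents, i := j = dropWhile); otherwise copy the line.
def pvBGo : List String → List String
  | [] => []
  | line :: rest =>
      if pvIsQuote line then
        pvDiv (pvContent line :: (rest.takeWhile pvIsQuote).map pvContent) :: pvBGo (rest.dropWhile pvIsQuote)
      else
        line :: pvBGo rest
termination_by ls => ls.length
decreasing_by
  · exact Nat.lt_succ_of_le (List.length_dropWhile_le pvIsQuote rest)
  · exact Nat.lt_succ_self _

def format_blockquotes_py_alt (text : String) : String :=
  PySem.Str.join "\n" (pvBGo (((PySem.Str.split? text "\n").getD [])))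

-- ===== PRECONDITION & SPEC =====
def Spec_format_blockquotes_py (text : String) (out : String) : Prop := out = format_blockquotes_py_alt text
instance (text : String) (out : String) : Decidable (Spec_format_blockquotes_py text out) := by unfold Spec_format_blockquotes_py; infer_instance

-- ===== CLAIM (what is proved, stated in full; the proofs are below) =====
def Claim_equal_format_blockquotes_py : Prop := ∀ (text : String), Dom_format_blockquotes_py text → Spec_format_blockquotes_py text (format_blockquotes_py text)

-- ===== LEMMAS AND PROOFS =====

-- the accumulator `result` only ever grows on the right
theorem pvALoop_append (ls : List String) : ∀ (res : List String) (inq : Bool) (qs : List String),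
    pvALoop ls res inq qs = res ++ pvALoop ls [] inq qs := by
  induction ls with
  | nil => intro res inq qs; simp [pvALoop]; split <;> simp
  | cons l rest ih =>
      intro res inq qs
      simp only [pvALoop]
      split
      · rw [ih res]
      · split
        · rw [ih (res ++ [pvDiv qs] ++ [l]), ih ([] ++ [pvDiv qs] ++ [l])]; simp
        · rw [ih (res ++ [l]), ih ([] ++ [l])]; simp

-- joint invariant: from a fresh state A's loop computes B's grouping; with a pending run qs it
-- finishes that run (takeWhile) into one div and continues fresh on the rest (dropWhile)
theorem pvALoop_main (ls : List String) :
    (∀ qs, pvALoop ls [] true qs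
        = pvDiv (qs ++ (ls.takeWhile pvIsQuote).map pvContent) :: pvBGo (ls.dropWhile pvIsQuote))
    ∧ pvALoop ls [] false [] = pvBGo ls := by
  induction ls with
  | nil => exact ⟨fun qs => by simp [pvALoop, pvBGo], by simp [pvALoop, pvBGo]⟩
  | cons l rest ih =>
      have hq : ∀ qs, pvALoop (l :: rest) [] true qs
          = pvDiv (qs ++ ((l :: rest).takeWhile pvIsQuote).map pvContent)
            :: pvBGo ((l :: rest).dropWhile pvIsQuote) := by
        intro qs
        by_cases h : pvIsQuote l = true
        · have h' := h
          simp only [pvIsQuote] at h'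
          simp only [pvALoop, h', if_pos, List.takeWhile_cons, List.dropWhile_cons, h]
          rw [ih.1]
          simp [pvContent, List.append_assoc]
        · have h' := h
          simp only [pvIsQuote] at h'
          simp only [pvALoop, h', if_neg, Bool.not_eq_true] at *
          simp only [List.takeWhile_cons, List.dropWhile_cons, h]
          rw [pvALoop_append, ih.2]
          simp [pvBGo, h]
  -- A flushes `qs` as a div then emits `l` and continues fresh; B's grouping does the same
      refine ⟨hq, ?_⟩
      by_cases h : pvIsQuote l = true
      · have h' := h
        simp only [pvIsQuote] at h'
        simp only [pvALoop, h', if_pos]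
        rw [ih.1]
        simp only [pvBGo, h, if_true]
        simp [pvContent]
      · have h' := h
        simp only [pvIsQuote] at h'
        simp only [pvALoop, h', if_neg, Bool.not_eq_true] at *
        rw [pvALoop_append, ih.2]
        simp [pvBGo, h]

-- ===== VERDICT (by name: the statement is the Claim_ definition above) =====
theorem format_blockquotes_py_spec : Claim_equal_format_blockquotes_py := by
  intro text _
  unfold Spec_format_blockquotes_py format_blockquotes_py format_blockquotes_py_alt
  rw [(pvALoop_main _).2]
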